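-- pv_equiv track=rewrite | github.com/nathanprez6/Object-Oriented-Labs | Lab03/Lab03.py | get_letters_remaining
-- ===== SOURCE A (Python) =====
-- def get_letters_remaining(incorrect, correct):
--     """
--     Determines how many letters of the alphabet are remaining to choose
--     from given the letters already guessed
--
--     Args:
--         incorrect (list): A list of incorrect guesses
--         correct (list): A list of correct guesses
--
--     Returns:
--         A list of remaining letters in the alphabet to choose from
--     """
--     remaining_letters = ['A', 'B', 'C', 'D', 'E', 'F', 'G', 'H', 'I', 'J', 'K', 'L', 'M',
--                          'N', 'O', 'P', 'Q', 'R', 'S', 'T', 'U', 'V', 'W', 'X', 'Y', 'Z']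
--
--     for item in incorrect:
--         if item in remaining_letters:
--             remaining_letters.remove(item)
--     for item in correct:
--         if item in remaining_letters:
--             remaining_letters.remove(item)
--
--     return remaining_letters
-- ===== SOURCE B (Python) =====
-- def get_letters_remaining(incorrect, correct):
--     guessed = set(incorrect) | set(correct)
--     return [letter for letter in "ABCDEFGHIJKLMNOPQRSTUVWXYZ" if letter not in guessed]
-- ===== Notes on version B (the rewrite author's own statement) =====
-- stated objective: idiomatic
-- what changed: Instead of mutating the alphabet list by repeated membership test + remove per guess, B builds one set of all guesses and returns a single order-preserving filter comprehension over the alphabet.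
import Mathlib
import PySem

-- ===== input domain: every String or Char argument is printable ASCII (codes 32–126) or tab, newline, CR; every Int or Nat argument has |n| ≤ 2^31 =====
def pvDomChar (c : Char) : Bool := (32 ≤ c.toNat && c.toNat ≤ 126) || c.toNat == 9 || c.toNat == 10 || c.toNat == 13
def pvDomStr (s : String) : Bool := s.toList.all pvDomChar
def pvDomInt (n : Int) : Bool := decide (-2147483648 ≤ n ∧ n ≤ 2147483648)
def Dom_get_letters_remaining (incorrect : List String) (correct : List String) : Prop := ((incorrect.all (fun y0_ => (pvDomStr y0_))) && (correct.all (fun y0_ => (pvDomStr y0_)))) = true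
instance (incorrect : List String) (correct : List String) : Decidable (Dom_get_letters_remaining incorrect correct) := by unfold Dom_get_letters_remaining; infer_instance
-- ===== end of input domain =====

-- B builds one set of all guesses and filters the alphabet in a single pass,
-- instead of A's mutation of the alphabet list (membership test + remove per guess).

-- ===== PORT A =====
-- the literal alphabet list of A
def pvAlphabetA : List String :=
  ["A","B","C","D","E","F","G","H","I","J","K","L","M",
   "N","O","P","Q","R","S","T","U","V","W","X","Y","Z"]

-- one iteration of A's loops: 'if item in remaining: remaining.remove(item)'
def pvStepA (rem : List String) (item : String) : List String :=
  if rem.contains item then (PySem.List.remove? rem item).getD rem else rem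

def get_letters_remaining (incorrect : List String) (correct : List String) : List String :=
  List.foldl pvStepA (List.foldl pvStepA pvAlphabetA incorrect) correct

-- ===== PORT B =====
def get_letters_remaining_alt (incorrect : List String) (correct : List String) : List String :=
  let guessed : PySem.Set String := PySem.Set.union (PySem.Set.ofList incorrect) correct
  ("ABCDEFGHIJKLMNOPQRSTUVWXYZ".toList.map (fun c => String.ofList [c])).filter
    (fun letter => !(PySem.Set.contains guessed letter))

-- ===== PRECONDITION & SPEC =====
def Spec_get_letters_remaining (incorrect : List String) (correct : List String) (out : List String) : Prop := out = get_letters_remaining_alt incorrect correct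
instance (incorrect : List String) (correct : List String) (out : List String) : Decidable (Spec_get_letters_remaining incorrect correct out) := by unfold Spec_get_letters_remaining; infer_instance

-- ===== CLAIM (what is proved, stated in full; the proofs are below) =====
def Claim_equal_get_letters_remaining : Prop := ∀ (incorrect : List String) (correct : List String), Dom_get_letters_remaining incorrect correct → Spec_get_letters_remaining incorrect correct (get_letters_remaining incorrect correct)

-- ===== LEMMAS AND PROOFS =====

-- On a duplicate-free list, A's conditional remove is exactly a filter.
theorem pvStepA_nodup {rem : List String} (h : rem.Nodup) (x : String) :
    pvStepA rem x = rem.filter (fun c => c ≠ x) := by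
  unfold pvStepA
  by_cases hx : x ∈ rem
  · rw [if_pos (by simpa using hx), PySem.List.remove?_eq_some_erase rem x hx, Option.getD_some,
      List.Nodup.erase_eq_filter h]
    simp [bne, decide_not]
    rfl
  · rw [if_neg (by simpa using hx)]
    symm
    apply List.filter_eq_self.mpr
    intro a ha
    simp only [decide_eq_true_eq]
    exact fun hax => hx (hax ▸ ha)

-- Folding A's step over the guess list filters out all the guesses, on a nodup list.
theorem pvFoldA_nodup (gs : List String) :
    ∀ (rem : List String), rem.Nodup →
      List.foldl pvStepA rem gs = rem.filter (fun c => !gs.contains c) := by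
  induction gs with
  | nil => intro rem _; simp
  | cons g gs ih =>
    intro rem h
    have h1 : pvStepA rem g = rem.filter (fun c => c ≠ g) := pvStepA_nodup h g
    rw [List.foldl_cons, h1, ih _ (h.filter _), List.filter_filter]
    apply List.filter_congr
    intro a _
    simp [Bool.not_or, Bool.and_comm, decide_not]

theorem pvAlphabetA_nodup : pvAlphabetA.Nodup := by decide

theorem pvAlphabetB_eq :
    ("ABCDEFGHIJKLMNOPQRSTUVWXYZ".toList.map (fun c => String.ofList [c])) = pvAlphabetA := by
  decide

-- ===== VERDICT (by name: the statement is the Claim_ definition above) =====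
theorem get_letters_remaining_spec : Claim_equal_get_letters_remaining := by
  intro incorrect correct _
  unfold Spec_get_letters_remaining get_letters_remaining get_letters_remaining_alt
  rw [pvAlphabetB_eq,
    pvFoldA_nodup incorrect pvAlphabetA pvAlphabetA_nodup,
    pvFoldA_nodup correct _ (pvAlphabetA_nodup.filter _),
    List.filter_filter]
  apply List.filter_congr
  intro a _
  simp [PySem.Set.mem_union, PySem.Set.mem_ofList, Bool.and_comm]
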